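-- pv_equiv track=rewrite | github.com/namheee/CoreSwitchingCircuit | Core_switching_circuit_calculation_module.py | find_downstream_nodes_and_max_edge_weights
-- ===== SOURCE A (Python) =====
-- def find_downstream_nodes_and_max_edge_weights(edges_dict, start_nodes):
--     """
--     Finds downstream nodes from the given start nodes and prints the maximum edge weight used at each step.
--
--     :param edges_dict: A dictionary where keys are edges (source, sign, target), and values are edge weights.
--                        Key format: (source, sign, target)
--     :param start_nodes: A set of source node names to start the traversal from.
--     """
--     current_nodes = set(start_nodes)  # Nodes to explore in the current step
--     visited_edges = set()  # Track visited edges to avoid reprocessing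
--
--     Max_weights = []
--
--     while current_nodes:
--         downstream_nodes = set()  # Nodes discovered in this step
--         max_weight = float('-inf')  # Maximum weight in the current step
--
--         for (source, sign, target), weight in edges_dict.items():
--             if source in current_nodes and (source, sign, target) not in visited_edges:
--                 downstream_nodes.add(target)  # Add connected downstream node
--                 visited_edges.add((source, sign, target))  # Mark edge as visited
--                 max_weight = max(max_weight, weight)  # Update the maximum weight
--
--         if downstream_nodes:
--             Max_weights.append(max_weight)
--         else:
--             break
--
--         # Move to the next step
--         current_nodes = downstream_nodes
--
--     return Max_weights
-- ===== SOURCE B (Python) =====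
-- def find_downstream_nodes_and_max_edge_weights(edges_dict, start_nodes):
--     """Indexes the edges by source node once, then walks level by level touching only
--     the frontier's outgoing adjacency lists; a per-NODE 'expanded' set replaces the
--     per-edge visited set (all out-edges of a source fire together the first time the
--     source is in a frontier), so each adjacency list is read at most once."""
--     adj = {}
--     for (source, sign, target), weight in edges_dict.items():
--         adj.setdefault(source, []).append((target, weight))
--     expanded = set()
--     frontier = set(start_nodes)
--     max_weights = []
--     while True:
--         fired = []
--         for s in frontier:
--             if s not in expanded:
--                 expanded.add(s)
--                 fired.extend(adj.get(s, []))
--         if not fired: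
--             break
--         max_weights.append(max(w for _t, w in fired))
--         frontier = {t for t, _w in fired}
--     return max_weights
-- ===== Notes on version B (the rewrite author's own statement) =====
-- stated objective: alternative
-- what changed: B builds a source-indexed adjacency map once and keeps a per-node expanded set, so each level reads only the frontier's adjacency lists instead of A's full edge-dict rescan guarded by a per-edge visited set; each edge is read once across all levels.
import Mathlib
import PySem

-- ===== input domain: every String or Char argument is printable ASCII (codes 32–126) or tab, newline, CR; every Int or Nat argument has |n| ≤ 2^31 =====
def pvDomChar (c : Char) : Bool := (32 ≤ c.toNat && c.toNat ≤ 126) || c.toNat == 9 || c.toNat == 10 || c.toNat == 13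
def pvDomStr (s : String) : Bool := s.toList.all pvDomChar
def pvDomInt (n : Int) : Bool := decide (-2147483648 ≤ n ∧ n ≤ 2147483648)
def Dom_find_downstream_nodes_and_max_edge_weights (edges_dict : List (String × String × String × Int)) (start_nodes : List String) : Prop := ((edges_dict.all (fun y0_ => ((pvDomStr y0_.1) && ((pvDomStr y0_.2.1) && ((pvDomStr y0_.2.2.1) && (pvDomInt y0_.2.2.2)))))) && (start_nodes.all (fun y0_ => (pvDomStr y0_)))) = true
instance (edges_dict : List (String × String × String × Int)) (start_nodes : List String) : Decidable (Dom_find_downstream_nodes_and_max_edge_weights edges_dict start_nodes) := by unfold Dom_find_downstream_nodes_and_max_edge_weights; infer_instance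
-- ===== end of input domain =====

-- B indexes the edges by source node once and keeps a per-node expanded set, touching only the
-- frontier's adjacency lists per level, instead of A's full edge rescan with a per-edge visited set
-- (objective: alternative).


-- the dict parameter: (source, sign, target) ↦ weight, as Python's dict(pairs) sees it
def pvKeyed (e : String × String × String × Int) : (String × String × String) × Int :=
  ((e.1, e.2.1, e.2.2.1), e.2.2.2)

-- ===== PORT A =====
-- max(max_weight, weight) with max_weight starting at float('-inf'): none plays -inf
def pvMaxO (m : Option Int) (w : Int) : Option Int :=
  match m with
  | none => some w
  | some a => some (max a w)

-- the while loop of A: state = (current_nodes, visited_edges, Max_weights); fuel bounds the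
-- number of levels (each continuing level marks at least one new edge visited)
def pvLoopA (items : List ((String × String × String) × Int)) :
    Nat → PySem.Set String → PySem.Set (String × String × String) → List Int → List Int
  | 0, _, _, acc => acc
  | fuel+1, cur, vis, acc =>
    if cur.isEmpty then acc else
      let st := items.foldl
        (fun (st : PySem.Set String × PySem.Set (String × String × String) × Option Int) e =>
          if PySem.Set.contains cur e.1.1 && !(PySem.Set.contains st.2.1 e.1) then
            (PySem.Set.add st.1 e.1.2.2, (PySem.Set.add st.2.1 e.1, pvMaxO st.2.2 e.2))
          else st)
        (PySem.Set.empty, (vis, none))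
      if st.1.isEmpty then acc
      else
        match st.2.2 with
        | some w => pvLoopA items fuel st.1 st.2.1 (acc ++ [w])
        | none => acc   -- unreachable: a discovered node means some edge updated max_weight

def find_downstream_nodes_and_max_edge_weights (edges_dict : List (String × String × String × Int)) (start_nodes : List String) : List Int :=
  let items := (PySem.Dict.ofList (edges_dict.map pvKeyed)).items
  pvLoopA items (items.length + 1) (PySem.Set.ofList start_nodes) PySem.Set.empty []

-- ===== PORT B =====
-- the while True loop of Source B: state = (frontier, expanded, max_weights); the inner for-loop
-- over the frontier set builds (fired, expanded); fuel bounds the number of levels (each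
-- continuing level fires ≥ 1 edge and a fired edge's source is expanded, so never refires)
def pvLoopB (adj : PySem.Dict String (List (String × Int))) :
    Nat → PySem.Set String → PySem.Set String → List Int → List Int
  | 0, _, _, acc => acc
  | fuel+1, frontier, expanded, acc =>
    let st := frontier.foldl
      (fun (st : List (String × Int) × PySem.Set String) s =>
        if PySem.Set.contains st.2 s then st
        else (st.1 ++ adj.getD s [], PySem.Set.add st.2 s))
      ([], expanded)
    if st.1.isEmpty then acc
    else
      match PySem.List.max? (st.1.map (·.2)) (fun w => w) with
      | some w => pvLoopB adj fuel (PySem.Set.ofList (st.1.map (·.1))) st.2 (acc ++ [w])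
      | none => acc   -- unreachable: fired is nonempty

def find_downstream_nodes_and_max_edge_weights_alt (edges_dict : List (String × String × String × Int)) (start_nodes : List String) : List Int :=
  let items := (PySem.Dict.ofList (edges_dict.map pvKeyed)).items
  -- adj.setdefault(source, []).append((target, weight))  ==  adj[source] = adj.get(source, []) + [(target, weight)]
  let adj := items.foldl
    (fun (d : PySem.Dict String (List (String × Int))) e =>
      d.modify e.1.1 [] (· ++ [(e.1.2.2, e.2)]))
    PySem.Dict.empty
  pvLoopB adj (items.length + 1) (PySem.Set.ofList start_nodes) PySem.Set.empty []

-- ===== PRECONDITION & SPEC =====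
def Spec_find_downstream_nodes_and_max_edge_weights (edges_dict : List (String × String × String × Int)) (start_nodes : List String) (out : List Int) : Prop := out = find_downstream_nodes_and_max_edge_weights_alt edges_dict start_nodes
instance (edges_dict : List (String × String × String × Int)) (start_nodes : List String) (out : List Int) : Decidable (Spec_find_downstream_nodes_and_max_edge_weights edges_dict start_nodes out) := by unfold Spec_find_downstream_nodes_and_max_edge_weights; infer_instance

-- ===== CLAIM (what is proved, stated in full; the proofs are below) =====
def Claim_equal_find_downstream_nodes_and_max_edge_weights : Prop := ∀ (edges_dict : List (String × String × String × Int)) (start_nodes : List String), Dom_find_downstream_nodes_and_max_edge_weights edges_dict start_nodes → Spec_find_downstream_nodes_and_max_edge_weights edges_dict start_nodes (find_downstream_nodes_and_max_edge_weights edges_dict start_nodes)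

-- ===== LEMMAS AND PROOFS =====

-- the edges A processes in one level, in dict order
def pvProc (cur : PySem.Set String) (vis : PySem.Set (String × String × String))
    (items : List ((String × String × String) × Int)) : List ((String × String × String) × Int) :=
  items.filter (fun e => PySem.Set.contains cur e.1.1 && !(PySem.Set.contains vis e.1))

-- A's level fold, split into its three independent components (needs unique keys:
-- the visited additions made during the level never affect a later test in the same level)
theorem pvFoldA_char (cur : PySem.Set String) :
    ∀ (items : List ((String × String × String) × Int)),
      (items.map (·.1)).Nodup →
      ∀ (down : PySem.Set String) (vis : PySem.Set (String × String × String)) (m : Option Int),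
      items.foldl
        (fun (st : PySem.Set String × PySem.Set (String × String × String) × Option Int) e =>
          if PySem.Set.contains cur e.1.1 && !(PySem.Set.contains st.2.1 e.1) then
            (PySem.Set.add st.1 e.1.2.2, (PySem.Set.add st.2.1 e.1, pvMaxO st.2.2 e.2))
          else st)
        (down, (vis, m))
      = ((pvProc cur vis items).foldl (fun s e => PySem.Set.add s e.1.2.2) down,
         ((pvProc cur vis items).foldl (fun s e => PySem.Set.add s e.1) vis,
          (pvProc cur vis items).foldl (fun m e => pvMaxO m e.2) m)) := by
  intro items
  induction items with
  | nil => intro _ down vis m; simp [pvProc]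
  | cons e t ih =>
    intro hnd down vis m
    have hndt : (t.map (·.1)).Nodup := (List.nodup_cons.mp hnd).2
    have hne : ∀ x ∈ t, x.1 ≠ e.1 := by
      intro x hx hx1
      have hmem : x.1 ∈ t.map (fun y => y.1) := by
        simpa using List.mem_map_of_mem (f := fun y => y.1) hx
      rw [hx1] at hmem
      exact (List.nodup_cons.mp hnd).1 hmem
    by_cases hc : (PySem.Set.contains cur e.1.1 && !(PySem.Set.contains vis e.1)) = true
    · have hfilt : pvProc cur (PySem.Set.add vis e.1) t = pvProc cur vis t := by
        apply List.filter_congr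
        intro x hx
        simp [PySem.Set.contains, PySem.Set.mem_add, hne x hx]
      have hcons : pvProc cur vis (e :: t) = e :: pvProc cur vis t := by
        simp only [pvProc, List.filter_cons, hc, if_true]
      rw [List.foldl_cons, if_pos hc, ih hndt, hfilt, hcons]
      simp
    · have hcons : pvProc cur vis (e :: t) = pvProc cur vis t := by
        simp only [pvProc, List.filter_cons]
        rw [if_neg hc]
      rw [List.foldl_cons, if_neg hc, ih hndt, hcons]

-- B's level fold: fired = concatenated adjacency of the not-yet-expanded frontier nodes,
-- expanded' = expanded ∪ frontier (the conditional add is PySem.Set.add)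
theorem pvFoldB_char (adj : PySem.Dict String (List (String × Int))) :
    ∀ (front : List String), front.Nodup →
      ∀ (exp : PySem.Set String) (f0 : List (String × Int)),
      front.foldl
        (fun (st : List (String × Int) × PySem.Set String) s =>
          if PySem.Set.contains st.2 s then st
          else (st.1 ++ adj.getD s [], PySem.Set.add st.2 s))
        (f0, exp)
      = (f0 ++ (front.filter (fun s => !(PySem.Set.contains exp s))).flatMap
            (fun s => adj.getD s []),
         front.foldl (fun t s => PySem.Set.add t s) exp) := by
  intro front
  induction front with
  | nil => intro _ exp f0; simp
  | cons s t ih =>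
    intro hnd exp f0
    have hndt := (List.nodup_cons.mp hnd).2
    have hst : s ∉ t := (List.nodup_cons.mp hnd).1
    by_cases hc : PySem.Set.contains exp s = true
    · have hm : s ∈ exp := by simpa [PySem.Set.contains] using hc
      have hadd : PySem.Set.add exp s = exp := PySem.Set.add_of_mem hm
      rw [List.foldl_cons, if_pos hc, ih hndt]
      simp [PySem.Set.contains, hm]
    · have hm : s ∉ exp := by simpa [PySem.Set.contains] using hc
      rw [List.foldl_cons, if_neg hc, ih hndt]
      have hfilt : t.filter (fun x => !(PySem.Set.contains (PySem.Set.add exp s) x))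
          = t.filter (fun x => !(PySem.Set.contains exp x)) := by
        apply List.filter_congr
        intro x hx
        have hxs : x ≠ s := fun h => hst (h ▸ hx)
        simp [PySem.Set.contains, PySem.Set.mem_add, hxs]
      rw [hfilt]
      simp [PySem.Set.contains, List.flatMap_cons, hm]

-- a filter by membership in a Nodup list is a permutation of the per-element filters
theorem pvFilter_mem_perm {α β : Type} [DecidableEq β] (items : List α) (key : α → β) :
    ∀ (F : List β), F.Nodup →
      List.Perm (F.flatMap (fun s => items.filter (fun e => key e = s)))
        (items.filter (fun e => decide (key e ∈ F))) := by
  intro F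
  induction F with
  | nil => simp
  | cons s t ih =>
    intro hnd
    have hndt := (List.nodup_cons.mp hnd).2
    have hst : s ∉ t := (List.nodup_cons.mp hnd).1
    have hsplit : ∀ (l : List α),
        List.Perm (l.filter (fun e => key e = s) ++ l.filter (fun e => decide (key e ∈ t)))
          (l.filter (fun e => decide (key e ∈ s :: t))) := by
      intro l
      induction l with
      | nil => simp
      | cons a l ihl =>
        by_cases h1 : key a = s
        · have hp : decide (key a = s) = true := by simp [h1]
          have hq : decide (key a ∈ t) = false := by simp [h1, hst]
          have hr : decide (key a ∈ s :: t) = true := by simp [h1]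
          simp only [List.filter_cons, hp, hq, hr, if_true, Bool.false_eq_true, if_false,
            List.cons_append]
          exact ihl.cons a
        · have hp : decide (key a = s) = false := by simp [h1]
          by_cases h3 : key a ∈ t
          · have hq : decide (key a ∈ t) = true := by simp [h3]
            have hr : decide (key a ∈ s :: t) = true := by simp [h3]
            simp only [List.filter_cons, hp, hq, hr, if_true, Bool.false_eq_true, if_false]
            exact List.perm_middle.trans (ihl.cons a)
          · have hq : decide (key a ∈ t) = false := by simp [h3]
            have hr : decide (key a ∈ s :: t) = false := by simp [h1, h3]
            simp only [List.filter_cons, hp, hq, hr, Bool.false_eq_true, if_false]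
            exact ihl
    rw [List.flatMap_cons]
    exact (List.Perm.append_left _ (ih hndt)).trans (hsplit items)

-- running max: pvMaxO is right-commutative, so the fold is permutation-invariant
theorem pvMaxO_perm : ∀ {l l' : List Int}, List.Perm l l' →
    ∀ (m : Option Int), l.foldl pvMaxO m = l'.foldl pvMaxO m := by
  intro l l' h
  induction h with
  | nil => intro m; rfl
  | cons x _ ih => intro m; simp only [List.foldl_cons]; exact ih _
  | swap x y l =>
    intro m
    simp only [List.foldl_cons]
    have : pvMaxO (pvMaxO m y) x = pvMaxO (pvMaxO m x) y := by
      cases m <;> simp [pvMaxO, max_assoc, max_comm x y]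
    rw [this]
  | trans _ _ ih1 ih2 => intro m; exact (ih1 m).trans (ih2 m)

-- the running max over some-initialised pvMaxO is the plain foldl max
theorem pvMaxO_foldl_some {α : Type} (f : α → Int) : ∀ (l : List α) (a : Int),
    l.foldl (fun m e => pvMaxO m (f e)) (some a) = some ((l.map f).foldl max a) := by
  intro l
  induction l with
  | nil => intro a; simp
  | cons w t ih => intro a; simpa [pvMaxO] using ih (max a (f w))

-- the adjacency dict built by B: lookup = the edges with that source, in dict order
theorem pvAdj_getD (items : List ((String × String × String) × Int)) (s : String) :
    (items.foldl
        (fun (d : PySem.Dict String (List (String × Int))) e =>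
          d.modify e.1.1 [] (· ++ [(e.1.2.2, e.2)]))
        PySem.Dict.empty).getD s []
      = (items.filter (fun e => e.1.1 = s)).map (fun e => (e.1.2.2, e.2)) := by
  have h1 : items.foldl
      (fun (d : PySem.Dict String (List (String × Int))) e =>
        d.modify e.1.1 [] (· ++ [(e.1.2.2, e.2)]))
      PySem.Dict.empty
      = (items.map (fun e => (e.1.1, (e.1.2.2, e.2)))).foldl
        (fun d p => d.modify p.1 [] (· ++ [p.2])) PySem.Dict.empty := by
    rw [List.foldl_map]
  rw [h1, PySem.Dict.getD_foldl_modify_append, PySem.Dict.getD_empty]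
  simp only [List.filter_map, Function.comp_def, List.map_map, List.nil_append]
  have hf : (fun (x : (String × String × String) × Int) => x.1.1 == s)
      = (fun x => decide (x.1.1 = s)) := by
    funext x; exact Bool.beq_eq_decide_eq x.1.1 s
  rw [hf]

-- main invariant: A's (cur, vis) and B's (frontier, expanded) states agree as SETS level by
-- level: cur and frontier have the same members, and an edge is visited iff its source is expanded
theorem pvLoop_eq (items : List ((String × String × String) × Int))
    (hnd : (items.map (·.1)).Nodup)
    (adj : PySem.Dict String (List (String × Int)))
    (hadj : ∀ s, adj.getD s [] = (items.filter (fun e => e.1.1 = s)).map (fun e => (e.1.2.2, e.2))) :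
    ∀ (fuel : Nat) (cur front : PySem.Set String) (vis : PySem.Set (String × String × String))
      (exp : PySem.Set String) (acc : List Int),
      front.Nodup →
      (∀ x, x ∈ cur ↔ x ∈ front) →
      (∀ e ∈ items, (e.1 ∈ vis ↔ e.1.1 ∈ exp)) →
      pvLoopA items fuel cur vis acc = pvLoopB adj fuel front exp acc := by
  intro fuel
  induction fuel with
  | zero => intro _ _ _ _ _ _ _ _; rfl
  | succ fuel ih =>
    intro cur front vis exp acc hfr hcf hve
    rw [pvLoopA, pvLoopB]
    rw [pvFoldB_char adj front hfr exp []]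
    simp only [List.nil_append]
    -- B's fired list is a permutation of A's processed edges, projected to (target, weight)
    set F := front.filter (fun s => !(PySem.Set.contains exp s)) with hF
    have hFnd : F.Nodup := List.Nodup.filter _ hfr
    have hfired : F.flatMap (fun s => adj.getD s [])
        = ((F.flatMap (fun s => items.filter (fun e => e.1.1 = s))).map
            (fun e => (e.1.2.2, e.2))) := by
      rw [List.map_flatMap]
      exact List.flatMap_congr (fun s _ => hadj s)
    have hproc : items.filter (fun e => decide (e.1.1 ∈ F)) = pvProc cur vis items := by
      apply List.filter_congr
      intro e he
      have h1 : e.1.1 ∈ F ↔ (e.1.1 ∈ cur ∧ ¬ e.1 ∈ vis) := by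
        rw [hF, List.mem_filter]
        constructor
        · rintro ⟨hf, hx⟩
          refine ⟨(hcf _).mpr hf, ?_⟩
          intro hv
          have := (hve e he).mp hv
          simp [PySem.Set.contains, this] at hx
        · rintro ⟨hc, hv⟩
          refine ⟨(hcf _).mp hc, ?_⟩
          have : ¬ e.1.1 ∈ exp := fun h => hv ((hve e he).mpr h)
          simp [PySem.Set.contains, this]
      by_cases h2 : e.1.1 ∈ cur <;> by_cases h3 : e.1 ∈ vis <;>
        simp [PySem.Set.contains, h1, h2, h3]
    have hperm : List.Perm (F.flatMap (fun s => adj.getD s []))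
        ((pvProc cur vis items).map (fun e => (e.1.2.2, e.2))) := by
      rw [hfired, ← hproc]
      exact List.Perm.map _ (pvFilter_mem_perm items (fun e => e.1.1) F hFnd)
    by_cases hcur : cur.isEmpty = true
    · -- empty frontier: A stops at the while test; B's frontier is also [] so nothing fires
      have hc : cur = [] := List.isEmpty_iff.mp hcur
      have hfr0 : front = [] := by
        cases front with
        | nil => rfl
        | cons a t =>
          exfalso
          have : a ∈ cur := (hcf a).mpr (List.mem_cons_self ..)
          rw [hc] at this; simp at this
      have hF0 : F = [] := by rw [hF, hfr0]; rfl
      rw [if_pos hcur, hF0]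
      simp
    · rw [if_neg hcur]
      rw [pvFoldA_char cur items hnd]
      by_cases hp : pvProc cur vis items = []
      · -- nothing fires: both append nothing and stop
        have hfe : F.flatMap (fun s => adj.getD s []) = [] := by
          rw [hp] at hperm
          simpa using hperm.eq_nil
        rw [hp, hfe]
        simp [PySem.Set.empty]
      · obtain ⟨e, t, hp2⟩ := List.exists_cons_of_ne_nil hp
        -- A's downstream set is nonempty
        have hdown_ne : ((pvProc cur vis items).foldl
            (fun s e => PySem.Set.add s e.1.2.2) PySem.Set.empty).isEmpty = false := by
          have hin : e.1.2.2 ∈ (pvProc cur vis items).foldl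
              (fun s e => PySem.Set.add s e.1.2.2) PySem.Set.empty := by
            rw [PySem.Set.mem_foldl_add]
            exact Or.inr ⟨e, by rw [hp2]; exact List.mem_cons_self .., rfl⟩
          rcases h : ((pvProc cur vis items).foldl
              (fun s e => PySem.Set.add s e.1.2.2) PySem.Set.empty).isEmpty with _ | _
          · exact h
          · exfalso
            rw [List.isEmpty_iff] at h
            rw [h] at hin
            simp at hin
        -- B's fired list is nonempty
        have hfne : (F.flatMap (fun s => adj.getD s [])).isEmpty = false := by
          have := hperm.length_eq
          rw [hp2] at this
          rcases hh : F.flatMap (fun s => adj.getD s []) with _ | _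
          · rw [hh] at this; simp at this
          · rfl
        -- the two level maxima agree
        have hmaxA : (pvProc cur vis items).foldl (fun m e => pvMaxO m e.2) none
            = ((pvProc cur vis items).map (·.2)).foldl pvMaxO none := by
          rw [List.foldl_map]
        have hwperm : List.Perm ((F.flatMap (fun s => adj.getD s [])).map (·.2))
            ((pvProc cur vis items).map (·.2)) := by
          have := hperm.map (·.2)
          simpa [List.map_map] using this
        obtain ⟨w0, t0, hf2⟩ := List.exists_cons_of_ne_nil
          (by intro h; rw [h] at hfne; simp at hfne :
            F.flatMap (fun s => adj.getD s []) ≠ [])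
        have hmaxB : PySem.List.max? ((F.flatMap (fun s => adj.getD s [])).map (·.2)) (fun w => w)
            = (pvProc cur vis items).foldl (fun m e => pvMaxO m e.2) none := by
          rw [hmaxA, ← pvMaxO_perm hwperm none, hf2]
          rw [List.map_cons, PySem.List.max?_id_cons]
          simp only [List.foldl_cons, pvMaxO]
          simpa using (pvMaxO_foldl_some (fun w => w) (t0.map (·.2)) w0.2).symm
        have hmaxAsome : (pvProc cur vis items).foldl (fun m e => pvMaxO m e.2) none
            = some ((t.map (·.2)).foldl max e.2) := by
          rw [hp2, List.foldl_cons]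
          simp only [pvMaxO]
          exact pvMaxO_foldl_some (fun e => e.2) t e.2
        rw [hfne, hmaxB, hmaxAsome, hdown_ne]
        simp only [Bool.false_eq_true, if_false]
        -- recurse: establish the three invariants for the next level
        apply ih
        · exact PySem.Set.nodup_ofList _
        · -- same next frontier, as sets
          intro x
          rw [PySem.Set.mem_foldl_add, PySem.Set.mem_ofList]
          have hmem := fun y => hperm.mem_iff (a := y)
          constructor
          · rintro (hx | ⟨b, hb, rfl⟩)
            · simp [PySem.Set.empty] at hx
            · have : (b.1.2.2, b.2) ∈ F.flatMap (fun s => adj.getD s []) :=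
                (hmem _).mpr (List.mem_map_of_mem hb)
              exact List.mem_map_of_mem this
          · intro hx
            obtain ⟨p, hp3, rfl⟩ := List.mem_map.mp hx
            have := (hmem p).mp hp3
            obtain ⟨b, hb, rfl⟩ := List.mem_map.mp this
            exact Or.inr ⟨b, hb, rfl⟩
        · -- visited' ↔ expanded' on every dict edge
          intro e' he'
          rw [PySem.Set.mem_foldl_add]
          have hexp : ∀ x, x ∈ front.foldl (fun t s => PySem.Set.add t s) exp
              ↔ x ∈ exp ∨ x ∈ front := by
            intro x
            have := PySem.Set.mem_foldl_add (l := front) (f := fun s => s) (s := exp) (y := x)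
            simpa using this
          rw [hexp]
          constructor
          · rintro (hv | ⟨b, hb, heb⟩)
            · exact Or.inl ((hve e' he').mp hv)
            · have hbi : b ∈ items := List.mem_of_mem_filter hb
              have : e' = b := List.inj_on_of_nodup_map hnd he' hbi heb
              subst this
              have hbp := (List.mem_filter.mp hb).2
              simp only [PySem.Set.contains, Bool.and_eq_true, Bool.not_eq_true'] at hbp
              exact Or.inr ((hcf _).mp (by simpa using hbp.1))
          · rintro (he | hf)
            · exact Or.inl ((hve e' he').mpr he)
            · by_cases hv : e'.1 ∈ vis
              · exact Or.inl hv
              · refine Or.inr ⟨e', List.mem_filter.mpr ⟨he', ?_⟩, rfl⟩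
                have h1 : e'.1.1 ∈ cur := (hcf _).mpr hf
                simp [PySem.Set.contains, h1, hv]

-- the dict items carry pairwise distinct keys
theorem pvItems_nodup (edges_dict : List (String × String × String × Int)) :
    (((PySem.Dict.ofList (edges_dict.map pvKeyed)).items).map (·.1)).Nodup := by
  have := PySem.Dict.nodup_keys_ofList (ps := edges_dict.map pvKeyed)
  simpa [PySem.Dict.keys] using this

-- ===== VERDICT (by name: the statement is the Claim_ definition above) =====
theorem find_downstream_nodes_and_max_edge_weights_spec : Claim_equal_find_downstream_nodes_and_max_edge_weights := by
  intro edges_dict start_nodes _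
  show _ = _
  unfold find_downstream_nodes_and_max_edge_weights find_downstream_nodes_and_max_edge_weights_alt
  simp only []
  apply pvLoop_eq _ (pvItems_nodup edges_dict) _ (pvAdj_getD _)
  · exact PySem.Set.nodup_ofList _
  · intro x; rfl
  · intro e _; simp [PySem.Set.empty]
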